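-- pv_equiv track=rewrite | github.com/rubysash/randomstory | iconextractor.py | find_blocks
-- ===== SOURCE A (Python) =====
-- def find_blocks(arr, min_size=20):
--     blocks = []
--     start = None
--     for i, val in enumerate(arr):
--         if val > 0 and start is None:
--             start = i
--         elif val == 0 and start is not None:
--             if i - start >= min_size:
--                 blocks.append((start, i))
--             start = None
--     if start is not None and len(arr) - start >= min_size:
--         blocks.append((start, len(arr)))
--     return blocks
-- ===== SOURCE B (Python) =====
-- def find_blocks(arr, min_size=20):
--     # Pass 1: forward-fill a boolean mask of "inside a positive block" state.
--     mask = []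
--     state = False
--     for val in arr:
--         if val > 0:
--             state = True
--         elif val == 0:
--             state = False
--         mask.append(state)
--     # Pass 2: emit every maximal run of True of length >= min_size.
--     blocks = []
--     i = 0
--     n = len(arr)
--     while i < n:
--         if mask[i]:
--             lo = i
--             while i < n and mask[i]:
--                 i += 1
--             if i - lo >= min_size:
--                 blocks.append((lo, i))
--         else:
--             i += 1
--     return blocks
-- ===== Notes on version B (the rewrite author's own statement) =====
-- stated objective: alternative
-- what changed: Replaces the single stateful scan (optional start index, close-on-zero bookkeeping plus an after-loop epilogue) by two plain passes: forward-fill a boolean in-block mask, then extract maximal True runs and keep those of length >= min_size.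
import Mathlib
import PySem

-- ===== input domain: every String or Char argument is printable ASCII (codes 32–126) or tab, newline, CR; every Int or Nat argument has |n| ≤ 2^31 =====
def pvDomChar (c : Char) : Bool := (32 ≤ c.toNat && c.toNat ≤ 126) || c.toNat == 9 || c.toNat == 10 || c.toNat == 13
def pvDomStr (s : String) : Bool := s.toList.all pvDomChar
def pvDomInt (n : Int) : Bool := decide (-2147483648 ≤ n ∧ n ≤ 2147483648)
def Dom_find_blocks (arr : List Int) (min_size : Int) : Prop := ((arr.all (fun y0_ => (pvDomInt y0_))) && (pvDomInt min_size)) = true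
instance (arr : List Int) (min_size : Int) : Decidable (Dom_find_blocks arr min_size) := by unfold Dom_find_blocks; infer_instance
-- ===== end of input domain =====

-- ===== PORT A =====
-- B changes the decomposition (one stateful scan -> mask pass + run-extraction pass); same O(n) cost.
-- Literal port of A's loop: state = (blocks, start), index i tracked alongside.
def findBlocksLoopA (t : List Int) (i : Int) (start : Option Int)
    (blocks : List (Int × Int)) (min_size : Int) : List (Int × Int) :=
  match t with
  | [] =>
    -- epilogue: if start is not None and len(arr) - start >= min_size
    match start with
    | some st => if i - st ≥ min_size then blocks ++ [(st, i)] else blocks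
    | none => blocks
  | v :: tl =>
    match start with
    | none =>
      if v > 0 then findBlocksLoopA tl (i + 1) (some i) blocks min_size
      else findBlocksLoopA tl (i + 1) none blocks min_size
    | some st =>
      if v = 0 then
        findBlocksLoopA tl (i + 1) none
          (if i - st ≥ min_size then blocks ++ [(st, i)] else blocks) min_size
      else findBlocksLoopA tl (i + 1) (some st) blocks min_size

def find_blocks (arr : List Int) (min_size : Int) : List (Int × Int) :=
  findBlocksLoopA arr 0 none [] min_size

-- ===== PORT B =====
-- Pass 1 of Source B: the forward-filled in-block mask.
def fbMask (t : List Int) (state : Bool) : List Bool :=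
  match t with
  | [] => []
  | v :: tl =>
    let state' := if v > 0 then true else if v = 0 then false else state
    state' :: fbMask tl state'

-- inner while of pass 2: consume the leading True run, returning the index past it and the rest.
def fbTakeRun (m : List Bool) (i : Int) : Int × List Bool :=
  match m with
  | [] => (i, [])
  | b :: tl => if b then fbTakeRun tl (i + 1) else (i, b :: tl)

theorem fbTakeRun_len (m : List Bool) (i : Int) : (fbTakeRun m i).2.length ≤ m.length := by
  induction m generalizing i with
  | nil => simp [fbTakeRun]
  | cons b tl ih =>
    simp only [fbTakeRun]
    split
    · exact le_trans (ih (i + 1)) (Nat.le_succ _)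
    · simp

-- outer while of pass 2.
def fbScanRuns (m : List Bool) (i : Int) (min_size : Int) : List (Int × Int) :=
  match h : m with
  | [] => []
  | b :: tl =>
    if hb : b then
      let p := fbTakeRun tl (i + 1)
      (if p.1 - i ≥ min_size then [(i, p.1)] else []) ++ fbScanRuns p.2 p.1 min_size
    else fbScanRuns tl (i + 1) min_size
termination_by m.length
decreasing_by
  · exact Nat.lt_succ_of_le (fbTakeRun_len tl (i + 1))
  · simp

def find_blocks_alt (arr : List Int) (min_size : Int) : List (Int × Int) :=
  fbScanRuns (fbMask arr false) 0 min_size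

-- ===== PRECONDITION & SPEC =====
def Spec_find_blocks (arr : List Int) (min_size : Int) (out : List (Int × Int)) : Prop := out = find_blocks_alt arr min_size
instance (arr : List Int) (min_size : Int) (out : List (Int × Int)) : Decidable (Spec_find_blocks arr min_size out) := by unfold Spec_find_blocks; infer_instance

-- ===== CLAIM (what is proved, stated in full; the proofs are below) =====
def Claim_equal_find_blocks : Prop := ∀ (arr : List Int) (min_size : Int), Dom_find_blocks arr min_size → Spec_find_blocks arr min_size (find_blocks arr min_size)

-- ===== LEMMAS AND PROOFS =====

theorem fbScanRuns_nil (i ms : Int) : fbScanRuns [] i ms = [] := by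
  simp [fbScanRuns]

theorem fbScanRuns_false (tl : List Bool) (i ms : Int) :
    fbScanRuns (false :: tl) i ms = fbScanRuns tl (i + 1) ms := by
  simp [fbScanRuns]

theorem fbScanRuns_true (tl : List Bool) (i ms : Int) :
    fbScanRuns (true :: tl) i ms =
      (if (fbTakeRun tl (i + 1)).1 - i ≥ ms then [(i, (fbTakeRun tl (i + 1)).1)] else []) ++
        fbScanRuns (fbTakeRun tl (i + 1)).2 (fbTakeRun tl (i + 1)).1 ms := by
  simp [fbScanRuns]

-- Main invariant: A's loop state against B's two passes.
theorem loopA_invariant (t : List Int) (ms : Int) :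
    (∀ (i : Int) (blocks : List (Int × Int)),
        findBlocksLoopA t i none blocks ms = blocks ++ fbScanRuns (fbMask t false) i ms) ∧
    (∀ (i lo : Int) (blocks : List (Int × Int)),
        findBlocksLoopA t i (some lo) blocks ms =
          blocks ++
            ((if (fbTakeRun (fbMask t true) i).1 - lo ≥ ms
                then [(lo, (fbTakeRun (fbMask t true) i).1)] else []) ++
              fbScanRuns (fbTakeRun (fbMask t true) i).2 (fbTakeRun (fbMask t true) i).1 ms)) := by
  induction t with
  | nil =>
    constructor
    · intro i blocks
      simp [findBlocksLoopA, fbMask, fbScanRuns_nil]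
    · intro i lo blocks
      simp only [findBlocksLoopA, fbMask, fbTakeRun, fbScanRuns_nil, List.append_nil]
      split <;> simp
  | cons v tl ih =>
    obtain ⟨ih1, ih2⟩ := ih
    constructor
    · intro i blocks
      by_cases hv : v > 0
      · -- start the block: mask head is true
        simp only [findBlocksLoopA, fbMask, if_pos hv]
        rw [ih2 (i + 1) i blocks, fbScanRuns_true]
      · by_cases hz : v = 0
        · simp only [findBlocksLoopA, fbMask, if_neg hv, if_pos hz]
          rw [ih1 (i + 1) blocks, fbScanRuns_false]
        · simp only [findBlocksLoopA, fbMask, if_neg hv, if_neg hz]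
          rw [ih1 (i + 1) blocks, fbScanRuns_false]
    · intro i lo blocks
      by_cases hz : v = 0
      · -- close the block: mask head is false, run ends at i
        have hv : ¬ v > 0 := by omega
        simp only [findBlocksLoopA, fbMask, if_pos hz, if_neg hv, fbTakeRun, if_neg (Bool.false_ne_true)]
        rw [ih1 (i + 1), fbScanRuns_false]
        split <;> simp
      · -- v ≠ 0: state kept, mask head is true, run continues
        have hhead : (if v > 0 then true else true) = true := by split <;> rfl
        simp only [findBlocksLoopA, fbMask, if_neg hz, hhead, fbTakeRun, reduceIte]
        rw [ih2 (i + 1) lo blocks]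

-- ===== VERDICT (by name: the statement is the Claim_ definition above) =====
theorem find_blocks_spec : Claim_equal_find_blocks := by
  intro arr ms _
  unfold Spec_find_blocks find_blocks find_blocks_alt
  simpa using (loopA_invariant arr ms).1 0 []
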